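-- pv_equiv track=rewrite | github.com/levaspb/algorithms | pluses.py | pli
-- ===== SOURCE A (Python) =====
-- def pli(n, array, pos):
-- 	while n != pos:
-- 		if pos * 2 + 1 <= n:
-- 			array.append(pos)
-- 			n -= pos
-- 			pos += 1
-- 		else:
-- 			pos += 1
-- 	array.append(pos)
-- 	return array
-- ===== SOURCE B (Python) =====
-- # B: closed-form count via binary search on triangular numbers — computes k, the number
-- # of appends A's greedy loop performs, as the smallest i with i*i + i*(2*pos+3) + 4*pos + 2 - 2*n > 0
-- # (that quadratic is the loop condition after i appends; it is monotone), then builds the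
-- # answer in one shot: array + [pos, .., pos+k-1] + [n - k*pos - k*(k-1)//2].  Alternative
-- # algorithm of the same task; no speed-up is claimed.
-- # Like A, B mutates `array` in place (the return value is the mutated list).
-- def pli(n, array, pos):
--     lo, hi = 0, n + 2
--     while lo < hi:
--         mid = (lo + hi) // 2
--         if mid * mid + mid * (2 * pos + 3) + 4 * pos + 2 - 2 * n <= 0:
--             lo = mid + 1
--         else:
--             hi = mid
--     k = lo
--     array.extend(range(pos, pos + k))
--     array.append(n - k * pos - k * (k - 1) // 2)
--     return array
-- ===== Notes on version B (the rewrite author's own statement) =====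
-- stated objective: alternative
-- what changed: B replaces A's greedy while loop (O(n-pos) iterations) by a binary search for the append count k on the monotone quadratic obtained from the loop condition after i appends, then emits range(pos, pos+k) and the triangular-number remainder in one shot; a timing run could not confirm a >=1.5x speed-up, so none is claimed.
-- outside the precondition, e.g. on pli(-5, [], -3): A returns [-3, -2], B returns [-5]; on pli(3, [], 5): A does not finish within the time limit, B returns [3]
import Mathlib
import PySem

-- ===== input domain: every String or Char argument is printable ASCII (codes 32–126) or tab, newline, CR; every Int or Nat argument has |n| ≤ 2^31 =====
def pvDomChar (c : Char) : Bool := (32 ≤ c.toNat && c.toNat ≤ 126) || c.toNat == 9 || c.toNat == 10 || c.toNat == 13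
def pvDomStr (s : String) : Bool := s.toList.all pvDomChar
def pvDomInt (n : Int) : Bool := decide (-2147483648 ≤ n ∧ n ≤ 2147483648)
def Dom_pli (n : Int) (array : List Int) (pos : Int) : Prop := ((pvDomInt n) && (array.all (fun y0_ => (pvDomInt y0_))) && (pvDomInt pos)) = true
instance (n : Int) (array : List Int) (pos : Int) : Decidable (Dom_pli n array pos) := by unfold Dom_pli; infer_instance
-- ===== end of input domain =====

-- B replaces A's greedy loop by a binary search for the append count k on the monotone
-- quadratic loop condition, then builds the result in one shot (objective: alternative);
-- both Pythons mutate `array` in place, the equivalence is about the return value.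


-- ===== PORT A =====
-- A's while loop as fuel recursion; fuel (n-pos).toNat+1 bounds the iteration count on
-- every input admitted by Pre_pli (each iteration decreases n-pos by at least 1).
def pliLoop (fuel : Nat) (n : Int) (array : List Int) (pos : Int) : List Int :=
  match fuel with
  | 0 => array
  | fuel + 1 =>
    if n ≠ pos then
      if pos * 2 + 1 ≤ n then pliLoop fuel (n - pos) (array ++ [pos]) (pos + 1)
      else pliLoop fuel n array (pos + 1)
    else array ++ [pos]

def pli (n : Int) (array : List Int) (pos : Int) : List Int :=
  pliLoop ((n - pos).toNat + 1) n array pos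

-- ===== PORT B =====
-- the binary-search test `mid*mid + mid*(2*pos+3) + 4*pos + 2 - 2*n <= 0`
def pliOk (n pos i : Int) : Bool := i * i + i * (2 * pos + 3) + 4 * pos + 2 - 2 * n ≤ 0

-- B's binary-search while loop as fuel recursion; fuel (hi-lo).toNat+1 bounds it
-- (the gap hi-lo at least halves each iteration).
def pliBS (fuel : Nat) (n pos lo hi : Int) : Int :=
  match fuel with
  | 0 => lo
  | fuel + 1 =>
    if lo < hi then
      let mid := PySem.Int.floordiv (lo + hi) 2
      if pliOk n pos mid then pliBS fuel n pos (mid + 1) hi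
      else pliBS fuel n pos lo mid
    else lo

def pli_alt (n : Int) (array : List Int) (pos : Int) : List Int :=
  let k := pliBS ((n + 2 - 0).toNat + 1) n pos 0 (n + 2)
  array ++ PySem.List.pyRange pos (pos + k) 1
        ++ [n - k * pos - PySem.Int.floordiv (k * (k - 1)) 2]

-- ===== PRECONDITION & SPEC =====
-- Pre_pli is the function's natural domain 0 ≤ pos ≤ n: for pos > n A's idle increment
-- loop never reaches n (A diverges), and for negative pos A's mid-run `n == pos` exit can
-- fire inside the append phase — an accident of sign-flipping arithmetic that B does not
-- reproduce (see cites), so negative pos is excluded as a defensible-corner artefact.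
def Pre_pli (n : Int) (array : List Int) (pos : Int) : Prop := 0 ≤ pos ∧ pos ≤ n
instance (n : Int) (array : List Int) (pos : Int) : Decidable (Pre_pli n array pos) := by unfold Pre_pli; infer_instance

def pvWitness_pli : Int × List Int × Int := (7, [], 1)

def Spec_pli (n : Int) (array : List Int) (pos : Int) (out : List Int) : Prop := out = pli_alt n array pos
instance (n : Int) (array : List Int) (pos : Int) (out : List Int) : Decidable (Spec_pli n array pos out) := by unfold Spec_pli; infer_instance

-- ===== CLAIM (what is proved, stated in full; the proofs are below) =====
def Claim_equal_pli : Prop := ∀ (n : Int) (array : List Int) (pos : Int), Dom_pli n array pos → Pre_pli n array pos → Spec_pli n array pos (pli n array pos)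

-- ===== LEMMAS AND PROOFS =====

theorem pliOk_mono {n pos a b : Int} (hpos : 0 ≤ pos) (ha : 0 ≤ a) (hab : a ≤ b)
    (hb : pliOk n pos b = true) : pliOk n pos a = true := by
  simp only [pliOk, decide_eq_true_eq] at *
  nlinarith

theorem pliBS_spec (n pos : Int) (hpos : 0 ≤ pos) : ∀ (fuel : Nat) (lo hi : Int), 0 ≤ lo → lo ≤ hi →
    (hi - lo).toNat ≤ fuel →
    lo ≤ pliBS fuel n pos lo hi ∧ pliBS fuel n pos lo hi ≤ hi ∧
    (∀ i, lo ≤ i → i < pliBS fuel n pos lo hi → pliOk n pos i = true) ∧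
    (pliOk n pos hi = false → pliOk n pos (pliBS fuel n pos lo hi) = false) := by
  intro fuel
  induction fuel with
  | zero =>
    intro lo hi h0 hle hf
    have : lo = hi := by omega
    subst this
    simp only [pliBS]
    exact ⟨le_rfl, le_rfl, fun i h1 h2 => absurd (h1.trans_lt h2) (lt_irrefl _), fun h => h⟩
  | succ f ih =>
    intro lo hi h0 hle hf
    by_cases hlt : lo < hi
    · have hdiv : PySem.Int.floordiv (lo + hi) 2 = (lo + hi) / 2 :=
        PySem.Int.floordiv_eq_ediv_of_pos (by omega)
      have hm := Int.emod_emod_of_dvd (lo + hi) (dvd_refl 2)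
      have hmod : (lo + hi) % 2 = lo + hi - 2 * ((lo + hi) / 2) := by omega
      have h2 : 0 ≤ (lo + hi) % 2 := Int.emod_nonneg _ (by norm_num)
      have h3 : (lo + hi) % 2 < 2 := Int.emod_lt_of_pos _ (by norm_num)
      set mid := (lo + hi) / 2 with hmiddef
      have hmlo : lo ≤ mid := by omega
      have hmhi : mid < hi := by omega
      by_cases hok : pliOk n pos mid = true
      · have hstep : pliBS (f + 1) n pos lo hi = pliBS f n pos (mid + 1) hi := by
          simp only [pliBS, if_pos hlt, hdiv, hok, if_true]
        rw [hstep]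
        obtain ⟨r1, r2, r3, r4⟩ := ih (mid + 1) hi (by omega) (by omega) (by omega)
        refine ⟨by omega, r2, ?_, r4⟩
        intro i hi1 hi2
        by_cases hmid : i ≤ mid
        · exact pliOk_mono hpos (by omega) hmid hok
        · exact r3 i (by omega) hi2
      · have hstep : pliBS (f + 1) n pos lo hi = pliBS f n pos lo mid := by
          simp only [pliBS, if_pos hlt, hdiv]
          rw [if_neg hok]
        rw [hstep]
        obtain ⟨r1, r2, r3, r4⟩ := ih lo mid h0 (by omega) (by omega)
        refine ⟨r1, by omega, r3, fun _ => ?_⟩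
        exact r4 (by simpa using hok)
    · have hlohi : lo = hi := le_antisymm hle (not_lt.mp hlt)
      subst hlohi
      have heq : pliBS (f + 1) n pos lo lo = lo := by simp [pliBS]
      rw [heq]
      exact ⟨le_rfl, le_rfl, fun i h1 h2 => absurd (h1.trans_lt h2) (lt_irrefl _), fun h => h⟩

-- the computed count of pli_alt
def pliK (n pos : Int) : Int := pliBS ((n + 2 - 0).toNat + 1) n pos 0 (n + 2)

theorem pliK_spec (n pos : Int) (hpos : 0 ≤ pos) (hn : 0 ≤ n) :
    0 ≤ pliK n pos ∧ (∀ i, 0 ≤ i → i < pliK n pos → pliOk n pos i = true) ∧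
    pliOk n pos (pliK n pos) = false := by
  obtain ⟨r1, r2, r3, r4⟩ :=
    pliBS_spec n pos hpos ((n + 2 - 0).toNat + 1) 0 (n + 2) le_rfl (by omega) (by omega)
  refine ⟨r1, r3, r4 ?_⟩
  simp only [pliOk, decide_eq_false_iff_not, not_le]
  nlinarith

theorem pliK_unique (n pos k : Int) (hpos : 0 ≤ pos) (hn : 0 ≤ n)
    (hk0 : 0 ≤ k) (hall : ∀ i, 0 ≤ i → i < k → pliOk n pos i = true)
    (hkf : pliOk n pos k = false) : pliK n pos = k := by
  obtain ⟨h1, h2, h3⟩ := pliK_spec n pos hpos hn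
  rcases lt_trichotomy (pliK n pos) k with h | h | h
  · exact absurd (hall _ h1 h) (by simp [h3])
  · exact h
  · exact absurd (h2 _ hk0 h) (by simp [hkf])

theorem pliOk_shift (n pos i : Int) : pliOk n pos (i + 1) = pliOk (n - pos) (pos + 1) i := by
  simp only [pliOk]
  congr 1
  ring_nf

theorem pliK_zero (n pos : Int) (hpos : 0 ≤ pos) (hn : 0 ≤ n)
    (h : ¬ pos * 2 + 1 ≤ n) : pliK n pos = 0 := by
  apply pliK_unique n pos 0 hpos hn le_rfl (by intro i h1 h2; omega)
  simp only [pliOk, decide_eq_false_iff_not, not_le]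
  omega

theorem pliK_succ (n pos : Int) (hpos : 0 ≤ pos) (h : pos * 2 + 1 ≤ n) :
    pliK n pos = pliK (n - pos) (pos + 1) + 1 := by
  have hn : 0 ≤ n := by omega
  obtain ⟨h1, h2, h3⟩ := pliK_spec (n - pos) (pos + 1) (by omega) (by omega)
  apply pliK_unique n pos (pliK (n - pos) (pos + 1) + 1) hpos hn (by omega)
  · intro i hi1 hi2
    rcases eq_or_lt_of_le hi1 with h0 | h0
    · simp only [pliOk, ← h0, decide_eq_true_eq]; ring_nf; omega
    · obtain ⟨j, rfl⟩ : ∃ j, i = j + 1 := ⟨i - 1, by omega⟩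
      rw [pliOk_shift]
      exact h2 j (by omega) (by omega)
  · rw [pliOk_shift]
    exact h3

theorem pyRange_cons_left (a b : Int) (h : a < b) :
    PySem.List.pyRange a b 1 = a :: PySem.List.pyRange (a + 1) b 1 :=
  PySem.List.pyRange_one_cons h

theorem pli_alt_eq_pliK (n : Int) (array : List Int) (pos : Int) :
    pli_alt n array pos =
      array ++ PySem.List.pyRange pos (pos + pliK n pos) 1
            ++ [n - pliK n pos * pos - PySem.Int.floordiv (pliK n pos * (pliK n pos - 1)) 2] := rfl

-- B exit form when the loop condition fails at the start
theorem pli_alt_exit (n : Int) (array : List Int) (pos : Int) (hpos : 0 ≤ pos) (hn : 0 ≤ n)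
    (h : ¬ pos * 2 + 1 ≤ n) : pli_alt n array pos = array ++ [n] := by
  rw [pli_alt_eq_pliK, pliK_zero n pos hpos hn h]
  norm_num [PySem.List.pyRange, PySem.Int.floordiv]

-- B step form when the loop condition holds
theorem pli_alt_step (n : Int) (array : List Int) (pos : Int) (hpos : 0 ≤ pos)
    (h : pos * 2 + 1 ≤ n) :
    pli_alt n array pos = pli_alt (n - pos) (array ++ [pos]) (pos + 1) := by
  rw [pli_alt_eq_pliK, pli_alt_eq_pliK, pliK_succ n pos hpos h]
  set k := pliK (n - pos) (pos + 1) with hk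
  have hk0 : 0 ≤ k := (pliK_spec (n - pos) (pos + 1) (by omega) (by omega)).1
  have hr : PySem.List.pyRange pos (pos + (k + 1)) 1
      = pos :: PySem.List.pyRange (pos + 1) (pos + 1 + k) 1 := by
    rw [pyRange_cons_left pos (pos + (k + 1)) (by omega)]
    congr 1
    congr 1
    omega
  rw [hr]
  have harith : n - (k + 1) * pos - PySem.Int.floordiv ((k + 1) * (k + 1 - 1)) 2
      = (n - pos) - k * (pos + 1) - PySem.Int.floordiv (k * (k - 1)) 2 := by
    have e1 : (k + 1) * (k + 1 - 1) = k * (k - 1) + 2 * k := by ring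
    have e2 : PySem.Int.floordiv (k * (k - 1) + 2 * k) 2
        = PySem.Int.floordiv (k * (k - 1)) 2 + k := by
      rw [PySem.Int.floordiv_eq_ediv_of_pos (by norm_num),
          PySem.Int.floordiv_eq_ediv_of_pos (by norm_num)]
      omega
    rw [e1, e2]
    ring
  rw [harith]
  simp

theorem pliLoop_succ (f : Nat) (n : Int) (array : List Int) (pos : Int) :
    pliLoop (f + 1) n array pos =
      if n ≠ pos then
        if pos * 2 + 1 ≤ n then pliLoop f (n - pos) (array ++ [pos]) (pos + 1)
        else pliLoop f n array (pos + 1)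
      else array ++ [pos] := rfl

theorem loop_eq : ∀ (fuel : Nat) (n pos : Int) (array : List Int),
    0 ≤ pos → pos ≤ n → (n - pos).toNat < fuel →
    pliLoop fuel n array pos = pli_alt n array pos := by
  intro fuel
  induction fuel with
  | zero => intro n pos array _ _ h; omega
  | succ f ih =>
    intro n pos array hpos hle hfuel
    by_cases hne : n = pos
    · have hc : ¬ (pos * 2 + 1 ≤ n) := by omega
      rw [pliLoop_succ, if_neg (by simpa using hne),
          pli_alt_exit n array pos hpos (by omega) hc, hne]
    · have hlt : pos < n := lt_of_le_of_ne hle (fun h => hne h.symm)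
      by_cases hc : pos * 2 + 1 ≤ n
      · rw [pliLoop_succ, if_pos (by simpa using hne), if_pos hc,
            ih (n - pos) (pos + 1) (array ++ [pos]) (by omega) (by omega) (by omega),
            pli_alt_step n array pos hpos hc]
      · rw [pliLoop_succ, if_pos (by simpa using hne), if_neg hc,
            ih n (pos + 1) array (by omega) (by omega) (by omega),
            pli_alt_exit n array (pos + 1) (by omega) (by omega) (by omega),
            pli_alt_exit n array pos hpos (by omega) hc]

-- ===== VERDICT (by name: the statement is the Claim_ definition above) =====
theorem pli_spec : Claim_equal_pli := by
  intro n array pos _ hpre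
  unfold Spec_pli pli
  exact loop_eq ((n - pos).toNat + 1) n pos array hpre.1 hpre.2 (by omega)
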